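-- pv_equiv track=rewrite | github.com/AlwinW64/Advanced_Disk_Scheduling_Simulator | core/cscan.py | cscan
-- ===== SOURCE A (Python) =====
-- def cscan(requests, head, direction="right", disk_size=200):
--     total_seek_time = 0
--     sequence = []
--     requests_sorted = sorted(requests)
--     if direction == "right":
--         for i in range(head, disk_size):
--             if i in requests_sorted:
--                 sequence.append(i)
--                 total_seek_time += abs(head - i)
--                 head = i
--                 requests_sorted.remove(i)
--         sequence.append(disk_size - 1)
--         total_seek_time += abs(head - (disk_size - 1))
--         head = 0
--         for i in range(0, disk_size):
--             if i in requests_sorted: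
--                 sequence.append(i)
--                 total_seek_time += abs(head - i)
--                 head = i
--                 requests_sorted.remove(i)
--     else:
--         for i in range(head, -1, -1):
--             if i in requests_sorted:
--                 sequence.append(i)
--                 total_seek_time += abs(head - i)
--                 head = i
--                 requests_sorted.remove(i)
--         sequence.append(0)
--         total_seek_time += abs(head - 0)
--         head = disk_size - 1
--         for i in range(disk_size - 1, -1, -1):
--             if i in requests_sorted:
--                 sequence.append(i)
--                 total_seek_time += abs(head - i)
--                 head = i
--                 requests_sorted.remove(i)
--     return sequence, total_seek_time
-- ===== SOURCE B (Python) =====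
-- def _sweep(tracks, pending, cur):
--     seq = []
--     total = 0
--     for t in tracks:
--         if pending.get(t, 0) > 0:
--             pending[t] -= 1
--             seq.append(t)
--             total += abs(cur - t)
--             cur = t
--     return seq, total, cur
--
--
-- def cscan(requests, head, direction="right", disk_size=200):
--     pending = {}
--     for r in requests:
--         pending[r] = pending.get(r, 0) + 1
--     tracks = sorted(pending)
--     end = disk_size - 1
--     if direction == "right":
--         seq1, t1, cur = _sweep([t for t in tracks if head <= t < disk_size], pending, head)
--         seq2, t2, _ = _sweep([t for t in tracks if 0 <= t < disk_size], pending, 0)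
--         return seq1 + [end] + seq2, t1 + abs(cur - end) + t2
--     else:
--         rev = tracks[::-1]
--         seq1, t1, cur = _sweep([t for t in rev if 0 <= t <= head], pending, head)
--         seq2, t2, _ = _sweep([t for t in rev if 0 <= t < disk_size], pending, end)
--         return seq1 + [0] + seq2, t1 + abs(cur) + t2
-- ===== Notes on version B (the rewrite author's own statement) =====
-- stated objective: faster
-- what changed: A scans every track of the disk twice (a range over disk_size) with a list membership test and remove per track; B builds a pending-count dictionary once, sorts the distinct request tracks, and services them in two sweeps over that sorted list, decrementing a track's pending count when it is serviced.
import Mathlib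
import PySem

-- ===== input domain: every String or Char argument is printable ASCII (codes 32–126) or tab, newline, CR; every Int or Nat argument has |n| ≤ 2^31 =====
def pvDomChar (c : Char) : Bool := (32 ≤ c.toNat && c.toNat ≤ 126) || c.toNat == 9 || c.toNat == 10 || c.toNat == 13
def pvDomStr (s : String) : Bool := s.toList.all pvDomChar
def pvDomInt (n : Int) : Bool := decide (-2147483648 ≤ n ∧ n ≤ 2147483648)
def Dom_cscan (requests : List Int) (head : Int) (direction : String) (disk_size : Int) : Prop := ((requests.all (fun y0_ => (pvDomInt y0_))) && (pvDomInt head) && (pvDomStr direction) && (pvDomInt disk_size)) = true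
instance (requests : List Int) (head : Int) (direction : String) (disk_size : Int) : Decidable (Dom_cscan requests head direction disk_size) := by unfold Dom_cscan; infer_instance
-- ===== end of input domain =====

-- B replaces A's scan over every disk track (membership test + remove per track) by two sweeps
-- over the sorted distinct request tracks, a pending-count dictionary deciding (by decrement)
-- which tracks still have a request to service on each sweep.

-- ===== PORT A =====
-- one iteration of A's `if i in requests_sorted: …` loop body; state = (sequence, total, head, requests_sorted)
def cscanStep (s : List Int × Int × Int × List Int) (i : Int) : List Int × Int × Int × List Int :=
  if s.2.2.2.contains i then
    (s.1 ++ [i], s.2.1 + |s.2.2.1 - i|, i, (PySem.List.remove? s.2.2.2 i).getD s.2.2.2)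
  else s

def cscan (requests : List Int) (head : Int) (direction : String) (disk_size : Int) : List Int × Int :=
  let requests_sorted := PySem.List.sorted requests (fun x => x) false
  if direction == "right" then
    let s1 := (PySem.List.pyRange head disk_size 1).foldl cscanStep ([], 0, head, requests_sorted)
    let s1' := (s1.1 ++ [disk_size - 1], s1.2.1 + |s1.2.2.1 - (disk_size - 1)|, (0 : Int), s1.2.2.2)
    let s2 := (PySem.List.pyRange 0 disk_size 1).foldl cscanStep s1'
    (s2.1, s2.2.1)
  else
    let s1 := (PySem.List.pyRange head (-1) (-1)).foldl cscanStep ([], 0, head, requests_sorted)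
    let s1' := (s1.1 ++ [0], s1.2.1 + |s1.2.2.1 - 0|, disk_size - 1, s1.2.2.2)
    let s2 := (PySem.List.pyRange (disk_size - 1) (-1) (-1)).foldl cscanStep s1'
    (s2.1, s2.2.1)

-- ===== PORT B =====
-- one iteration of Source B's `_sweep` loop body; state = (seq, total, cur, pending);
-- Python's in-place `pending[t] -= 1` is threaded as the fourth state component
def sweepStep (s : List Int × Int × Int × PySem.Dict Int Int) (t : Int) :
    List Int × Int × Int × PySem.Dict Int Int :=
  if 0 < s.2.2.2.getD t 0 then
    (s.1 ++ [t], s.2.1 + |s.2.2.1 - t|, t, s.2.2.2.insert t (s.2.2.2.getD t 0 - 1))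
  else s

def cscan_alt (requests : List Int) (head : Int) (direction : String) (disk_size : Int) : List Int × Int :=
  let pending := requests.foldl (fun d v => d.insert v (d.getD v 0 + 1)) (PySem.Dict.empty : PySem.Dict Int Int)
  let tracks := PySem.List.sorted pending.keys (fun x => x) false
  let e := disk_size - 1
  if direction == "right" then
    let s1 := (tracks.filter (fun t => decide (head ≤ t) && decide (t < disk_size))).foldl
                sweepStep ([], 0, head, pending)
    let s2 := (tracks.filter (fun t => decide (0 ≤ t) && decide (t < disk_size))).foldl
                sweepStep ([], 0, (0 : Int), s1.2.2.2)
    (s1.1 ++ [e] ++ s2.1, s1.2.1 + |s1.2.2.1 - e| + s2.2.1)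
  else
    let rev := tracks.reverse
    let s1 := (rev.filter (fun t => decide (0 ≤ t) && decide (t ≤ head))).foldl
                sweepStep ([], 0, head, pending)
    let s2 := (rev.filter (fun t => decide (0 ≤ t) && decide (t < disk_size))).foldl
                sweepStep ([], 0, e, s1.2.2.2)
    (s1.1 ++ [0] ++ s2.1, s1.2.1 + |s1.2.2.1| + s2.2.1)

-- ===== PRECONDITION & SPEC =====
def Spec_cscan (requests : List Int) (head : Int) (direction : String) (disk_size : Int) (out : List Int × Int) : Prop := out = cscan_alt requests head direction disk_size
instance (requests : List Int) (head : Int) (direction : String) (disk_size : Int) (out : List Int × Int) : Decidable (Spec_cscan requests head direction disk_size out) := by unfold Spec_cscan; infer_instance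

-- ===== CLAIM (what is proved, stated in full; the proofs are below) =====
def Claim_equal_cscan : Prop := ∀ (requests : List Int) (head : Int) (direction : String) (disk_size : Int), Dom_cscan requests head direction disk_size → Spec_cscan requests head direction disk_size (cscan requests head direction disk_size)

-- ===== LEMMAS AND PROOFS =====

-- seek distance walked along `seq` starting at `cur`
def cscanCost : Int → List Int → Int
  | _, [] => 0
  | cur, v :: rest => |cur - v| + cscanCost v rest

-- the A port's remove-if-present is List.erase
lemma removeD_eq_erase (lst : List Int) (i : Int) :
    (PySem.List.remove? lst i).getD lst = lst.erase i := by
  by_cases h : i ∈ lst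
  · rw [PySem.List.remove?_eq_some_erase lst i h]; rfl
  · rw [(PySem.List.remove?_eq_none_iff lst i).2 h, List.erase_of_not_mem h]; rfl

-- A's track-scan loop over a duplicate-free track list R: it appends the hits (tracks of R present
-- in lst, in R's order), walks their seek cost, ends at the last hit, and erases each hit once.
lemma scan_fold (R : List Int) : ∀ (seq : List Int) (t h : Int) (lst : List Int), R.Nodup →
    R.foldl cscanStep (seq, t, h, lst) =
      (seq ++ R.filter (fun i => lst.contains i),
       t + cscanCost h (R.filter (fun i => lst.contains i)),
       (R.filter (fun i => lst.contains i)).getLastD h,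
       (R.filter (fun i => lst.contains i)).foldl (fun l i => l.erase i) lst) := by
  induction R with
  | nil => intro seq t h lst _; simp [cscanCost]
  | cons r R ih =>
    intro seq t h lst hR
    obtain ⟨hr, hR⟩ : r ∉ R ∧ R.Nodup := by
      rw [List.nodup_cons] at hR; exact hR
    by_cases hmem : r ∈ lst
    · have hc : lst.contains r = true := by simpa using hmem
      have hfilt : R.filter (fun i => (lst.erase r).contains i)
          = R.filter (fun i => lst.contains i) := by
        apply List.filter_congr
        intro i hi
        have hne : i ≠ r := fun h' => hr (h' ▸ hi)
        simp [List.mem_erase_of_ne hne]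
      have hfc : (r :: R).filter (fun i => lst.contains i)
          = r :: R.filter (fun i => lst.contains i) := by
        simp [hmem]
      have hstep : cscanStep (seq, t, h, lst) r
          = (seq ++ [r], t + |h - r|, r, lst.erase r) := by
        simp [cscanStep, hmem, removeD_eq_erase]
      rw [List.foldl_cons, hstep, ih _ _ _ _ hR, hfilt, hfc]
      simp only [cscanCost, List.getLastD_cons, List.append_assoc,
        List.singleton_append, List.foldl_cons, Prod.mk.injEq]
      exact ⟨trivial, by ring, trivial⟩
    · have hc : lst.contains r = false := by simpa using hmem
      have hfc : (r :: R).filter (fun i => lst.contains i)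
          = R.filter (fun i => lst.contains i) := by
        simp [hmem]
      have hstep : cscanStep (seq, t, h, lst) r = (seq, t, h, lst) := by
        simp [cscanStep, hmem]
      rw [List.foldl_cons, hstep, ih _ _ _ _ hR, hfc]

-- B's sweep loop over a duplicate-free track list L: it services the tracks of L with a positive
-- pending count (in L's order), walks their seek cost, ends at the last one, and decrements each.
lemma sweep_fold (L : List Int) : ∀ (seq : List Int) (tot cur : Int) (d : PySem.Dict Int Int),
    L.Nodup →
    L.foldl sweepStep (seq, tot, cur, d) =
      (seq ++ L.filter (fun t => decide (0 < d.getD t 0)),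
       tot + cscanCost cur (L.filter (fun t => decide (0 < d.getD t 0))),
       (L.filter (fun t => decide (0 < d.getD t 0))).getLastD cur,
       (L.filter (fun t => decide (0 < d.getD t 0))).foldl
         (fun d t => d.insert t (d.getD t 0 - 1)) d) := by
  induction L with
  | nil => intro seq tot cur d _; simp [cscanCost]
  | cons r L ih =>
    intro seq tot cur d hL
    obtain ⟨hr, hL⟩ : r ∉ L ∧ L.Nodup := by
      rw [List.nodup_cons] at hL; exact hL
    by_cases hpos : 0 < d.getD r 0
    · have hfilt : L.filter (fun t => decide (0 < (d.insert r (d.getD r 0 - 1)).getD t 0))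
          = L.filter (fun t => decide (0 < d.getD t 0)) := by
        apply List.filter_congr
        intro t ht
        have hne : t ≠ r := fun h' => hr (h' ▸ ht)
        rw [PySem.Dict.getD_insert]
        simp [hne]
      have hfc : (r :: L).filter (fun t => decide (0 < d.getD t 0))
          = r :: L.filter (fun t => decide (0 < d.getD t 0)) := by
        simp [hpos]
      have hstep : sweepStep (seq, tot, cur, d) r
          = (seq ++ [r], tot + |cur - r|, r, d.insert r (d.getD r 0 - 1)) := by
        simp [sweepStep, hpos]
      rw [List.foldl_cons, hstep, ih _ _ _ _ hL, hfilt, hfc]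
      simp only [cscanCost, List.getLastD_cons, List.append_assoc,
        List.singleton_append, List.foldl_cons, Prod.mk.injEq]
      exact ⟨trivial, by ring, trivial⟩
    · have hfc : (r :: L).filter (fun t => decide (0 < d.getD t 0))
          = L.filter (fun t => decide (0 < d.getD t 0)) := by
        simp [hpos]
      have hstep : sweepStep (seq, tot, cur, d) r = (seq, tot, cur, d) := by
        simp [sweepStep, hpos]
      rw [List.foldl_cons, hstep, ih _ _ _ _ hL, hfc]

-- pending count after decrementing each track of a duplicate-free list once
lemma getD_dec_fold (F : List Int) : ∀ (d : PySem.Dict Int Int) (v : Int), F.Nodup →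
    (F.foldl (fun d t => d.insert t (d.getD t 0 - 1)) d).getD v 0
      = d.getD v 0 - (if v ∈ F then 1 else 0) := by
  induction F with
  | nil => intro d v _; simp
  | cons a F ih =>
    intro d v hF
    obtain ⟨ha, hF⟩ : a ∉ F ∧ F.Nodup := by
      rw [List.nodup_cons] at hF; exact hF
    simp only [List.foldl_cons]
    rw [ih _ _ hF, PySem.Dict.getD_insert]
    by_cases hv : v = a
    · subst hv; simp [ha]
    · simp [hv, List.mem_cons]

-- count of v in A's request list after the first pass erased each hit once
lemma count_foldl_erase (H : List Int) : ∀ (lst : List Int) (v : Int), H.Nodup →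
    (H.foldl (fun l i => l.erase i) lst).count v
      = lst.count v - (if v ∈ H then 1 else 0) := by
  induction H with
  | nil => intro lst v _; simp
  | cons a H ih =>
    intro lst v hH
    obtain ⟨ha, hH⟩ : a ∉ H ∧ H.Nodup := by
      rw [List.nodup_cons] at hH; exact hH
    simp only [List.foldl_cons]
    rw [ih _ _ hH]
    by_cases hv : v = a
    · subst hv
      simp [ha, List.count_erase_self]
    · simp [List.count_erase_of_ne hv, List.mem_cons, hv]

-- two strictly increasing integer lists with the same members are equal
lemma eq_of_pairwise_lt_of_mem_iff (l₁ : List Int) : ∀ (l₂ : List Int),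
    l₁.Pairwise (· < ·) → l₂.Pairwise (· < ·) →
    (∀ v, v ∈ l₁ ↔ v ∈ l₂) → l₁ = l₂ := by
  induction l₁ with
  | nil =>
    intro l₂ _ _ hm
    cases l₂ with
    | nil => rfl
    | cons b l₂ => exact absurd ((hm b).2 (by simp)) (by simp)
  | cons a l₁ ih =>
    intro l₂ h₁ h₂ hm
    cases l₂ with
    | nil => exact absurd ((hm a).1 (by simp)) (by simp)
    | cons b l₂ =>
      rw [List.pairwise_cons] at h₁ h₂
      obtain ⟨ha, h₁⟩ := h₁
      obtain ⟨hb, h₂⟩ := h₂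
      have hab : a = b := by
        have h1 : a ∈ b :: l₂ := (hm a).1 (by simp)
        have h2 : b ∈ a :: l₁ := (hm b).2 (by simp)
        rcases List.mem_cons.1 h1 with h | h
        · exact h
        · rcases List.mem_cons.1 h2 with h' | h'
          · exact h'.symm
          · have := hb a h; have := ha b h'; omega
      subst hab
      congr 1
      apply ih l₂ h₁ h₂
      intro v
      constructor
      · intro hv
        rcases List.mem_cons.1 ((hm v).1 (List.mem_cons_of_mem _ hv)) with h | h
        · exact absurd (ha v hv) (by omega)
        · exact h
      · intro hv
        rcases List.mem_cons.1 ((hm v).2 (List.mem_cons_of_mem _ hv)) with h | h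
        · exact absurd (hb v hv) (by omega)
        · exact h

-- strictly decreasing twin of the previous lemma
lemma eq_of_pairwise_gt_of_mem_iff (l₁ l₂ : List Int)
    (h₁ : l₁.Pairwise (· > ·)) (h₂ : l₂.Pairwise (· > ·))
    (hm : ∀ v, v ∈ l₁ ↔ v ∈ l₂) : l₁ = l₂ := by
  rw [← List.reverse_inj]
  apply eq_of_pairwise_lt_of_mem_iff
  · rw [List.pairwise_reverse]; exact h₁
  · rw [List.pairwise_reverse]; exact h₂
  · intro v; simp [hm v]

-- membership in A's request list after the first pass removed each hit once
lemma mem_after_pass (requests H1 : List Int) (hH1 : H1.Nodup) (v : Int) :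
    v ∈ H1.foldl (fun l i => l.erase i) (PySem.List.sorted requests (fun x => x) false)
      ↔ (if v ∈ H1 then 2 ≤ requests.count v else 0 < requests.count v) := by
  rw [← List.count_pos_iff, count_foldl_erase H1 _ v hH1,
    (PySem.List.sorted_perm requests (fun x => x) false).count_eq v]
  split_ifs <;> omega

lemma vals_mem (requests : List Int) (v : Int) :
    v ∈ PySem.List.sorted (PySem.Dict.counter requests).keys (fun x => x) false ↔ v ∈ requests := by
  rw [PySem.List.mem_sorted, PySem.Dict.keys_counter, PySem.Set.mem_ofList]

lemma vals_pairwise (requests : List Int) :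
    (PySem.List.sorted (PySem.Dict.counter requests).keys (fun x => x) false).Pairwise (· < ·) := by
  have hle := PySem.List.sorted_pairwise (PySem.Dict.counter requests).keys (fun x => x)
  have hnd : (PySem.List.sorted (PySem.Dict.counter requests).keys (fun x => x) false).Nodup :=
    ((PySem.List.sorted_perm (PySem.Dict.counter requests).keys (fun x => x) false).nodup_iff).2
      (PySem.Dict.nodup_keys_counter requests)
  have := List.Pairwise.and hle hnd
  exact this.imp (fun {a b} hab => lt_of_le_of_ne hab.1 hab.2)

-- both passes of A's scan, evaluated in one equation
lemma cscan_two_pass (R1 R2 : List Int) (hR1 : R1.Nodup) (hR2 : R2.Nodup)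
    (x h0 h2 : Int) (lst0 : List Int) :
    R2.foldl cscanStep
      ((R1.foldl cscanStep ([], 0, h0, lst0)).1 ++ [x],
       (R1.foldl cscanStep ([], 0, h0, lst0)).2.1 + |(R1.foldl cscanStep ([], 0, h0, lst0)).2.2.1 - x|,
       h2, (R1.foldl cscanStep ([], 0, h0, lst0)).2.2.2)
    = (R1.filter (fun i => lst0.contains i) ++ [x]
         ++ R2.filter (fun i => (((R1.filter (fun i => lst0.contains i)).foldl (fun l i => l.erase i) lst0).contains i)),
       0 + cscanCost h0 (R1.filter (fun i => lst0.contains i))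
         + |(R1.filter (fun i => lst0.contains i)).getLastD h0 - x|
         + cscanCost h2 (R2.filter (fun i => (((R1.filter (fun i => lst0.contains i)).foldl (fun l i => l.erase i) lst0).contains i))),
       (R2.filter (fun i => (((R1.filter (fun i => lst0.contains i)).foldl (fun l i => l.erase i) lst0).contains i))).getLastD h2,
       (R2.filter (fun i => (((R1.filter (fun i => lst0.contains i)).foldl (fun l i => l.erase i) lst0).contains i))).foldl
         (fun l i => l.erase i) ((R1.filter (fun i => lst0.contains i)).foldl (fun l i => l.erase i) lst0)) := by
  rw [scan_fold R1 [] 0 h0 lst0 hR1]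
  rw [scan_fold R2 _ _ _ _ hR2]
  rfl

lemma cscan_agree_right (requests : List Int) (head : Int) (direction : String) (disk_size : Int)
    (h : (direction == "right") = true) :
    cscan requests head direction disk_size = cscan_alt requests head direction disk_size := by
  simp only [cscan, cscan_alt, h, if_true]
  rw [cscan_two_pass _ _ (PySem.List.nodup_pyRange_one head disk_size)
        (PySem.List.nodup_pyRange_one 0 disk_size),
    PySem.Dict.foldl_insert_getD_add_one_eq_counter]
  have hvnd : (PySem.List.sorted (PySem.Dict.counter requests).keys (fun x => x) false).Nodup :=
    (vals_pairwise requests).imp (fun hab => ne_of_lt hab)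
  have hT1nd : ((PySem.List.sorted (PySem.Dict.counter requests).keys (fun x => x) false).filter
      (fun t => decide (head ≤ t) && decide (t < disk_size))).Nodup := hvnd.filter _
  have hT2nd : ((PySem.List.sorted (PySem.Dict.counter requests).keys (fun x => x) false).filter
      (fun t => decide (0 ≤ t) && decide (t < disk_size))).Nodup := hvnd.filter _
  have hF1 : ((PySem.List.sorted (PySem.Dict.counter requests).keys (fun x => x) false).filter
        (fun t => decide (head ≤ t) && decide (t < disk_size))).filter
        (fun t => decide (0 < (PySem.Dict.counter requests).getD t 0))
      = (PySem.List.sorted (PySem.Dict.counter requests).keys (fun x => x) false).filter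
        (fun t => decide (head ≤ t) && decide (t < disk_size)) := by
    rw [List.filter_eq_self]
    intro t ht
    have htr : t ∈ requests := (vals_mem requests t).1 (List.mem_of_mem_filter ht)
    simp [PySem.Dict.getD_counter, List.count_pos_iff.2 htr]
  have hp1 : (PySem.List.pyRange head disk_size 1).filter
        (fun i => (PySem.List.sorted requests (fun x => x) false).contains i)
      = (PySem.List.sorted (PySem.Dict.counter requests).keys (fun x => x) false).filter
          (fun t => decide (head ≤ t) && decide (t < disk_size)) := by
    apply eq_of_pairwise_lt_of_mem_iff
    · exact (PySem.List.pairwise_lt_pyRange_one head disk_size).filter _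
    · exact (vals_pairwise requests).filter _
    · intro v
      simp only [List.mem_filter, PySem.List.mem_pyRange_one, PySem.List.mem_sorted,
        List.contains_iff_mem, PySem.Dict.keys_counter, PySem.Set.mem_ofList,
        Bool.and_eq_true, decide_eq_true_eq]
      tauto
  rw [hp1]
  have hp2 : (PySem.List.pyRange 0 disk_size 1).filter
        (fun i => ((((PySem.List.sorted (PySem.Dict.counter requests).keys (fun x => x) false).filter
            (fun t => decide (head ≤ t) && decide (t < disk_size))).foldl
            (fun l i => l.erase i) (PySem.List.sorted requests (fun x => x) false)).contains i))
      = ((PySem.List.sorted (PySem.Dict.counter requests).keys (fun x => x) false).filter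
          (fun t => decide (0 ≤ t) && decide (t < disk_size))).filter
          (fun t => decide (0 < (((PySem.List.sorted (PySem.Dict.counter requests).keys (fun x => x) false).filter
            (fun t => decide (head ≤ t) && decide (t < disk_size))).foldl
            (fun d t => d.insert t (d.getD t 0 - 1)) (PySem.Dict.counter requests)).getD t 0)) := by
    apply eq_of_pairwise_lt_of_mem_iff
    · exact (PySem.List.pairwise_lt_pyRange_one 0 disk_size).filter _
    · exact ((vals_pairwise requests).filter _).filter _
    · intro v
      have hmm := mem_after_pass requests _ hT1nd v
      have hdd := getD_dec_fold _ (PySem.Dict.counter requests) v hT1nd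
      have hcm : v ∈ requests ↔ 0 < requests.count v := List.count_pos_iff.symm
      simp only [PySem.Dict.keys_counter] at hmm hdd
      simp only [List.mem_filter, List.contains_iff_mem, hmm, hdd,
        PySem.List.mem_pyRange_one, PySem.List.mem_sorted, PySem.Dict.keys_counter,
        PySem.Set.mem_ofList, PySem.Dict.getD_counter, Bool.and_eq_true,
        decide_eq_true_eq, hcm]
      split_ifs <;> omega
  rw [hp2,
    sweep_fold _ [] 0 head (PySem.Dict.counter requests) hT1nd, hF1,
    sweep_fold _ [] 0 0 _ hT2nd]
  simp only [Prod.mk.injEq, List.nil_append, List.append_assoc, List.singleton_append]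
  exact ⟨trivial, by ring⟩

lemma countdown_nodup (a : Int) : (PySem.List.pyRange a (-1) (-1)).Nodup := by
  rw [PySem.List.pyRange_neg_one_eq_reverse]
  exact List.nodup_reverse.2 (PySem.List.nodup_pyRange_one _ _)

lemma countdown_pairwise (a : Int) : (PySem.List.pyRange a (-1) (-1)).Pairwise (· > ·) := by
  rw [PySem.List.pyRange_neg_one_eq_reverse, List.pairwise_reverse]
  exact PySem.List.pairwise_lt_pyRange_one _ _

lemma cscan_agree_left (requests : List Int) (head : Int) (direction : String) (disk_size : Int)
    (h : (direction == "right") = false) :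
    cscan requests head direction disk_size = cscan_alt requests head direction disk_size := by
  simp only [cscan, cscan_alt, h, Bool.false_eq_true, if_false]
  rw [cscan_two_pass _ _ (countdown_nodup head) (countdown_nodup (disk_size - 1)),
    PySem.Dict.foldl_insert_getD_add_one_eq_counter]
  have hvnd : (PySem.List.sorted (PySem.Dict.counter requests).keys (fun x => x) false).Nodup :=
    (vals_pairwise requests).imp (fun hab => ne_of_lt hab)
  have hT1nd : ((PySem.List.sorted (PySem.Dict.counter requests).keys (fun x => x) false).reverse.filter
      (fun t => decide (0 ≤ t) && decide (t ≤ head))).Nodup := (List.nodup_reverse.2 hvnd).filter _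
  have hT2nd : ((PySem.List.sorted (PySem.Dict.counter requests).keys (fun x => x) false).reverse.filter
      (fun t => decide (0 ≤ t) && decide (t < disk_size))).Nodup := (List.nodup_reverse.2 hvnd).filter _
  have hF1 : ((PySem.List.sorted (PySem.Dict.counter requests).keys (fun x => x) false).reverse.filter
        (fun t => decide (0 ≤ t) && decide (t ≤ head))).filter
        (fun t => decide (0 < (PySem.Dict.counter requests).getD t 0))
      = (PySem.List.sorted (PySem.Dict.counter requests).keys (fun x => x) false).reverse.filter
        (fun t => decide (0 ≤ t) && decide (t ≤ head)) := by
    rw [List.filter_eq_self]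
    intro t ht
    have htr : t ∈ requests :=
      (vals_mem requests t).1 (List.mem_reverse.1 (List.mem_of_mem_filter ht))
    simp [PySem.Dict.getD_counter, List.count_pos_iff.2 htr]
  have hp1 : (PySem.List.pyRange head (-1) (-1)).filter
        (fun i => (PySem.List.sorted requests (fun x => x) false).contains i)
      = (PySem.List.sorted (PySem.Dict.counter requests).keys (fun x => x) false).reverse.filter
          (fun t => decide (0 ≤ t) && decide (t ≤ head)) := by
    apply eq_of_pairwise_gt_of_mem_iff
    · exact (countdown_pairwise head).filter _
    · exact (List.pairwise_reverse.2 (vals_pairwise requests)).filter _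
    · intro v
      have hcm : v ∈ requests ↔ 0 < requests.count v := List.count_pos_iff.symm
      simp only [List.mem_filter, List.mem_reverse, PySem.List.mem_pyRange_neg_one,
        PySem.List.mem_sorted, List.contains_iff_mem, PySem.Dict.keys_counter,
        PySem.Set.mem_ofList, Bool.and_eq_true, decide_eq_true_eq, hcm]
      omega
  rw [hp1]
  have hp2 : (PySem.List.pyRange (disk_size - 1) (-1) (-1)).filter
        (fun i => ((((PySem.List.sorted (PySem.Dict.counter requests).keys (fun x => x) false).reverse.filter
            (fun t => decide (0 ≤ t) && decide (t ≤ head))).foldl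
            (fun l i => l.erase i) (PySem.List.sorted requests (fun x => x) false)).contains i))
      = ((PySem.List.sorted (PySem.Dict.counter requests).keys (fun x => x) false).reverse.filter
          (fun t => decide (0 ≤ t) && decide (t < disk_size))).filter
          (fun t => decide (0 < (((PySem.List.sorted (PySem.Dict.counter requests).keys (fun x => x) false).reverse.filter
            (fun t => decide (0 ≤ t) && decide (t ≤ head))).foldl
            (fun d t => d.insert t (d.getD t 0 - 1)) (PySem.Dict.counter requests)).getD t 0)) := by
    apply eq_of_pairwise_gt_of_mem_iff
    · exact (countdown_pairwise (disk_size - 1)).filter _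
    · exact ((List.pairwise_reverse.2 (vals_pairwise requests)).filter _).filter _
    · intro v
      have hmm := mem_after_pass requests _ hT1nd v
      have hdd := getD_dec_fold _ (PySem.Dict.counter requests) v hT1nd
      have hcm : v ∈ requests ↔ 0 < requests.count v := List.count_pos_iff.symm
      simp only [PySem.Dict.keys_counter] at hmm hdd
      simp only [List.mem_filter, List.mem_reverse, List.contains_iff_mem, hmm, hdd,
        PySem.List.mem_pyRange_neg_one, PySem.List.mem_sorted, PySem.Dict.keys_counter,
        PySem.Set.mem_ofList, PySem.Dict.getD_counter, Bool.and_eq_true,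
        decide_eq_true_eq, hcm]
      split_ifs <;> omega
  rw [hp2,
    sweep_fold _ [] 0 head (PySem.Dict.counter requests) hT1nd, hF1,
    sweep_fold _ [] 0 (disk_size - 1) _ hT2nd]
  simp only [Prod.mk.injEq, List.nil_append, List.append_assoc, List.singleton_append, sub_zero]
  exact ⟨trivial, by ring⟩

-- ===== VERDICT (by name: the statement is the Claim_ definition above) =====
theorem cscan_spec : Claim_equal_cscan := by
  intro requests head direction disk_size _
  unfold Spec_cscan
  cases h : direction == "right" with
  | true => exact cscan_agree_right requests head direction disk_size h
  | false => exact cscan_agree_left requests head direction disk_size h
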